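-- pv_equiv track=rewrite | github.com/lehtiolab/msstitch | app/preparation/mzidtsv/proteingrouping.py | get_masters
-- ===== SOURCE A (Python) =====
-- def get_masters(ppgraph):
--     """From a protein-peptide graph dictionary (keys proteins,
--     values peptides), return master proteins aka those which
--     have no proteins whose peptides are supersets of them.
--     If shared master proteins are found, report only the first,
--     we will sort the whole proteingroup later anyway. In that
--     case, the master reported here may be temporary."""
--     masters = {}
--     for protein, peps in ppgraph.items():
--         ismaster = True
--         peps = set(peps)
--         multimaster = set()
--         for subprotein, subpeps in ppgraph.items():
--             if protein == subprotein:
--                 continue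
--             if peps.issubset(subpeps) and peps.union(subpeps) > peps:
--                 ismaster = False
--                 break
--             elif peps.issubset(subpeps) and peps.intersection(subpeps) == peps:
--                 multimaster.update({protein, subprotein})
--         if ismaster and not multimaster:
--             masters[protein] = 1
--         elif ismaster and multimaster:
--             masters[sorted(list(multimaster))[0]] = 1
--     return masters
-- ===== SOURCE B (Python) =====
-- def get_masters(ppgraph):
--     """Group proteins by their (deduplicated, sorted) peptide set and build an
--     inverted peptide -> pepset index, so the strict-superset test runs once per
--     distinct pepset and only against candidate pepsets sharing its first peptide,
--     instead of comparing every protein pair."""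
--     groups = {}
--     for prot, peps in ppgraph.items():
--         groups.setdefault(tuple(sorted(set(peps))), []).append(prot)
--     index = {}
--     for key in groups:
--         for pep in key:
--             index.setdefault(pep, []).append(key)
--     has_nonempty = any(key != () for key in groups)
--     dominated = {}
--     for key in groups:
--         if key:
--             dominated[key] = any(g != key and set(key) <= set(g)
--                                  for g in index[key[0]])
--         else:
--             dominated[key] = has_nonempty
--     masters = {}
--     for prot, peps in ppgraph.items():
--         key = tuple(sorted(set(peps)))
--         if not dominated[key]:
--             masters[min(groups[key])] = 1
--     return masters
-- ===== Notes on version B (the rewrite author's own statement) =====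
-- stated objective: faster
-- what changed: B groups proteins by their deduplicated sorted peptide set and builds an inverted peptide->pepset index, so the strict-superset test runs once per distinct pepset and only against candidate pepsets sharing its first peptide, instead of A's all-pairs scan with per-pair set operations.
import Mathlib
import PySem

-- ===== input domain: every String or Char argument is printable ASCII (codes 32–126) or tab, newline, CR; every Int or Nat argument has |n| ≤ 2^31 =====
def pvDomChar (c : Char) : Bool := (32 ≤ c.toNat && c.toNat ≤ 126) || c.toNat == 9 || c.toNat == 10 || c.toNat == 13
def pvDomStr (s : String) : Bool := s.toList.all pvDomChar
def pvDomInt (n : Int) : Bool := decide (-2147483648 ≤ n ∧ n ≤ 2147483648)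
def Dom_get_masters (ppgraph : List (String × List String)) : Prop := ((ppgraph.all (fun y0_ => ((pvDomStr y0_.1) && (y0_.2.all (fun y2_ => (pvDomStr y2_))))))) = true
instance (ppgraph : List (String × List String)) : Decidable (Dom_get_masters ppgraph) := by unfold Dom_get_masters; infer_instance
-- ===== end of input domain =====

-- B groups proteins by deduplicated sorted peptide set and uses an inverted peptide->pepset
-- index, so the strict-superset test runs once per distinct pepset against index candidates
-- only, instead of A's all-pairs scan (objective: faster).

-- ===== PORT A =====
-- 'peps.issubset(subpeps) and peps.union(subpeps) > peps' (strict superset test)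
def gmStrict (peps : PySem.Set String) (qp : List String) : Bool :=
  peps.issubset qp && ((PySem.Set.union peps qp).issuperset peps && !((PySem.Set.union peps qp).equal peps))

-- 'peps.issubset(subpeps) and peps.intersection(subpeps) == peps'
def gmEq (peps : PySem.Set String) (qp : List String) : Bool :=
  peps.issubset qp && (PySem.Set.equal (PySem.Set.inter peps qp) peps)

-- inner 'for subprotein, subpeps in ppgraph.items()' body; state = (ismaster, multimaster, broken)
def gmInnerStep (protein : String) (peps : PySem.Set String)
    (st : Bool × PySem.Set String × Bool) (q : String × List String) :
    Bool × PySem.Set String × Bool :=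
  if st.2.2 then st
  else if protein == q.1 then st
  else if gmStrict peps q.2 then (false, st.2.1, true)
  else if gmEq peps q.2 then (st.1, PySem.Set.update st.2.1 [protein, q.1], st.2.2)
  else st

-- outer loop body of A
def gmOuterStepA (items : List (String × List String)) (masters : PySem.Dict String Int)
    (pr : String × List String) : PySem.Dict String Int :=
  let peps := PySem.Set.ofList pr.2
  let st := items.foldl (gmInnerStep pr.1 peps) (true, ([] : PySem.Set String), false)
  if st.1 && st.2.1.isEmpty then masters.insert pr.1 1
  else if st.1 then
    match PySem.List.sorted st.2.1 (fun x => x) with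
    | m :: _ => masters.insert m 1
    | [] => masters
  else masters

def get_masters (ppgraph : List (String × List String)) : List (String × Int) :=
  let items := (PySem.Dict.ofList ppgraph).items
  (items.foldl (gmOuterStepA items) PySem.Dict.empty).items

-- ===== PORT B =====
-- 'tuple(sorted(set(peps)))'
def gmKey (peps : List String) : List String :=
  PySem.List.sorted (PySem.Set.ofList peps) (fun x => x)

-- 'groups.setdefault(key, []).append(prot)'
def gmGroups (items : List (String × List String)) : PySem.Dict (List String) (List String) :=
  items.foldl (fun g pr => g.modify (gmKey pr.2) [] (fun l => l ++ [pr.1])) PySem.Dict.empty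

-- 'for key in groups: for pep in key: index.setdefault(pep, []).append(key)'
def gmIndex (keys : List (List String)) : PySem.Dict String (List (List String)) :=
  keys.foldl (fun ix key =>
    key.foldl (fun ix pep => ix.modify pep [] (fun l => l ++ [key])) ix) PySem.Dict.empty

-- 'dominated[key] = any(g != key and set(key) <= set(g) for g in index[key[0]])' / has_nonempty
-- value of dominated[key]: has_nonempty for (), else the any(...) over index[key[0]]
def gmDomVal (ix : PySem.Dict String (List (List String))) (hasNonempty : Bool)
    (key : List String) : Bool :=
  match key with
  | [] => hasNonempty
  | p :: _ => (ix.getD p []).any (fun g => !(g == key) && PySem.Set.issubset key g)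

def gmDominated (keys : List (List String)) (ix : PySem.Dict String (List (List String)))
    (hasNonempty : Bool) : PySem.Dict (List String) Bool :=
  keys.foldl (fun d key => d.insert key (gmDomVal ix hasNonempty key)) PySem.Dict.empty

-- final loop body of B
def gmOuterStepB (groups : PySem.Dict (List String) (List String))
    (dom : PySem.Dict (List String) Bool) (masters : PySem.Dict String Int)
    (pr : String × List String) : PySem.Dict String Int :=
  let key := gmKey pr.2
  if dom.getD key true then masters
  else match PySem.List.min? (groups.getD key []) (fun x => x) with
    | some m => masters.insert m 1
    | none => masters

def get_masters_alt (ppgraph : List (String × List String)) : List (String × Int) :=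
  let items := (PySem.Dict.ofList ppgraph).items
  let groups := gmGroups items
  let ix := gmIndex groups.keys
  let hasNonempty := groups.keys.any (fun k => !k.isEmpty)
  let dom := gmDominated groups.keys ix hasNonempty
  (items.foldl (gmOuterStepB groups dom) PySem.Dict.empty).items

-- ===== PRECONDITION & SPEC =====
def Spec_get_masters (ppgraph : List (String × List String)) (out : List (String × Int)) : Prop := out = get_masters_alt ppgraph
instance (ppgraph : List (String × List String)) (out : List (String × Int)) : Decidable (Spec_get_masters ppgraph out) := by unfold Spec_get_masters; infer_instance

-- ===== CLAIM (what is proved, stated in full; the proofs are below) =====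
def Claim_equal_get_masters : Prop := ∀ (ppgraph : List (String × List String)), Dom_get_masters ppgraph → Spec_get_masters ppgraph (get_masters ppgraph)

-- ===== LEMMAS AND PROOFS =====

theorem gm_absorb (prot : String) (P : PySem.Set String) (l : List (String × List String))
    (st : Bool × PySem.Set String × Bool) (h : st.2.2 = true) :
    l.foldl (gmInnerStep prot P) st = st := by
  induction l generalizing st with
  | nil => rfl
  | cons q l ih =>
    simp only [List.foldl_cons]
    rw [show gmInnerStep prot P st q = st from by simp [gmInnerStep, h]]
    exact ih st h

theorem gm_innerA_ok (prot : String) (P : PySem.Set String) (l : List (String × List String))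
    (mm : PySem.Set String)
    (h : (l.any (fun q => !(prot == q.1) && gmStrict P q.2)) = false) :
    l.foldl (gmInnerStep prot P) (true, mm, false)
      = (true, l.foldl (fun s q => if !(prot == q.1) && gmEq P q.2 then PySem.Set.update s [prot, q.1] else s) mm, false) := by
  induction l generalizing mm with
  | nil => rfl
  | cons q l ih =>
    simp only [List.any_cons, Bool.or_eq_false_iff, Bool.and_eq_false_iff] at h
    simp only [List.foldl_cons]
    by_cases h1 : (prot == q.1) = true
    · rw [show gmInnerStep prot P (true, mm, false) q = (true, mm, false) from by
        simp [gmInnerStep, h1]]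
      rw [ih mm h.2]
      simp [h1]
    · have hs : gmStrict P q.2 = false := by
        rcases h.1 with hh | hh
        · simp [h1] at hh
        · exact hh
      by_cases h2 : gmEq P q.2 = true
      · rw [show gmInnerStep prot P (true, mm, false) q
            = (true, PySem.Set.update mm [prot, q.1], false) from by
          simp [gmInnerStep, h1, hs, h2]]
        rw [ih _ h.2]
        simp [h1, h2, hs]
      · rw [show gmInnerStep prot P (true, mm, false) q = (true, mm, false) from by
          simp [gmInnerStep, h1, hs, h2]]
        rw [ih mm h.2]
        simp [h1, h2]

theorem gm_innerA_break (prot : String) (P : PySem.Set String) (l : List (String × List String))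
    (mm : PySem.Set String)
    (h : (l.any (fun q => !(prot == q.1) && gmStrict P q.2)) = true) :
    (l.foldl (gmInnerStep prot P) (true, mm, false)).1 = false := by
  induction l generalizing mm with
  | nil => simp at h
  | cons q l ih =>
    simp only [List.foldl_cons]
    by_cases hb : (!(prot == q.1) && gmStrict P q.2) = true
    · have h1 : (prot == q.1) = false := by
        rcases Bool.and_eq_true_iff.mp hb with ⟨hx, _⟩
        simpa using hx
      have hs : gmStrict P q.2 = true := (Bool.and_eq_true_iff.mp hb).2
      rw [show gmInnerStep prot P (true, mm, false) q = (false, mm, true) from by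
        simp [gmInnerStep, h1, hs]]
      rw [gm_absorb prot P l _ rfl]
    · have hrec : (l.any (fun q => !(prot == q.1) && gmStrict P q.2)) = true := by
        simp only [List.any_cons] at h
        rcases Bool.or_eq_true_iff.mp h with hh | hh
        · exact absurd hh hb
        · exact hh
      by_cases h1 : (prot == q.1) = true
      · rw [show gmInnerStep prot P (true, mm, false) q = (true, mm, false) from by
          simp [gmInnerStep, h1]]
        exact ih mm hrec
      · have hs : gmStrict P q.2 = false := by
          by_contra hc
          exact hb (by simp [h1, Bool.not_eq_true] at hc ⊢; simp [hc, h1])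
        by_cases h2 : gmEq P q.2 = true
        · rw [show gmInnerStep prot P (true, mm, false) q
              = (true, PySem.Set.update mm [prot, q.1], false) from by
            simp [gmInnerStep, h1, hs, h2]]
          exact ih _ hrec
        · rw [show gmInnerStep prot P (true, mm, false) q = (true, mm, false) from by
            simp [gmInnerStep, h1, hs, h2]]
          exact ih mm hrec

theorem gm_mem_mmfold (a : String) (c : String × List String → Bool)
    (l : List (String × List String)) (mm : PySem.Set String) (x : String) :
    x ∈ l.foldl (fun s q => if c q then PySem.Set.update s [a, q.1] else s) mm
      ↔ x ∈ mm ∨ ∃ q ∈ l, c q = true ∧ (x = a ∨ x = q.1) := by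
  induction l generalizing mm with
  | nil => simp
  | cons q l ih =>
    simp only [List.foldl_cons]
    by_cases hc : c q = true
    · rw [if_pos hc, ih]
      simp only [PySem.Set.mem_update, List.mem_cons, List.not_mem_nil, or_false]
      aesop
    · rw [if_neg hc, ih]
      simp only [List.mem_cons]
      aesop

theorem gmStrict_iff (peps qp : List String) :
    gmStrict (PySem.Set.ofList peps) qp = true ↔ (∀ x ∈ peps, x ∈ qp) ∧ ¬(∀ x ∈ qp, x ∈ peps) := by
  simp only [gmStrict, Bool.and_eq_true, PySem.Set.issubset_iff, PySem.Set.issuperset_iff,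
    PySem.Set.mem_union, PySem.Set.mem_ofList, Bool.not_eq_true']
  constructor
  · rintro ⟨hsub, _, hne⟩
    refine ⟨hsub, fun hrev => ?_⟩
    have heq : ((PySem.Set.ofList peps).union qp).equal (PySem.Set.ofList peps) = true := by
      rw [PySem.Set.equal_iff]
      intro x
      simp only [PySem.Set.mem_union, PySem.Set.mem_ofList]
      exact ⟨fun hx => hx.elim id (fun hq => hrev x hq), Or.inl⟩
    rw [heq] at hne
    cases hne
  · rintro ⟨hsub, hnrev⟩
    refine ⟨hsub, fun x hx => Or.inl hx, ?_⟩
    by_contra hc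
    have heq : ((PySem.Set.ofList peps).union qp).equal (PySem.Set.ofList peps) = true := by
      revert hc
      cases ((PySem.Set.ofList peps).union qp).equal (PySem.Set.ofList peps) <;> simp
    rw [PySem.Set.equal_iff] at heq
    refine hnrev (fun x hx => ?_)
    have hm := (heq x).mp (by simp only [PySem.Set.mem_union, PySem.Set.mem_ofList]; exact Or.inr hx)
    rwa [PySem.Set.mem_ofList] at hm

theorem gmEq_iff (peps qp : List String) :
    gmEq (PySem.Set.ofList peps) qp = true ↔ (∀ x ∈ peps, x ∈ qp) := by
  simp only [gmEq, Bool.and_eq_true, PySem.Set.issubset_iff, PySem.Set.equal_iff,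
    PySem.Set.mem_inter, PySem.Set.mem_ofList]
  constructor
  · exact fun h => h.1
  · intro h
    exact ⟨h, fun x => ⟨fun hx => hx.1, fun hx => ⟨hx, h x hx⟩⟩⟩

theorem mem_gmKey (l : List String) (x : String) : x ∈ gmKey l ↔ x ∈ l := by
  simp [gmKey, PySem.List.mem_sorted, PySem.Set.mem_ofList]

theorem gmKey_eq_of_sameset (l l2 : List String) (h : ∀ x, x ∈ l ↔ x ∈ l2) :
    gmKey l = gmKey l2 := by
  have hp : (PySem.Set.ofList l).Perm (PySem.Set.ofList l2) := by
    rw [List.perm_ext_iff_of_nodup (PySem.Set.nodup_ofList _) (PySem.Set.nodup_ofList _)]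
    intro x
    simp only [PySem.Set.mem_ofList]
    exact h x
  exact PySem.List.sorted_eq_sorted_of_perm _ _ _ (fun a b hab => hab) hp

theorem getD_gmGroups (items : List (String × List String)) (K : List String) :
    (gmGroups items).getD K [] = (items.filter (fun pr => gmKey pr.2 == K)).map Prod.fst := by
  induction items using List.reverseRecOn with
  | nil => simp [gmGroups, PySem.Dict.getD_empty]
  | append_singleton l pr ih =>
    have hgg : gmGroups (l ++ [pr])
        = (gmGroups l).modify (gmKey pr.2) [] (fun s => s ++ [pr.1]) := by
      simp [gmGroups, List.foldl_append]
    rw [hgg, List.filter_append, List.map_append]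
    by_cases hK : K = gmKey pr.2
    · subst hK
      rw [PySem.Dict.getD_modify_self, ih]
      simp
    · rw [PySem.Dict.getD_modify_of_ne _ _ _ hK, ih]
      simp [beq_iff_eq, Ne.symm hK]

theorem mem_keys_gmGroups (items : List (String × List String)) (K : List String) :
    K ∈ (gmGroups items).keys ↔ ∃ pr ∈ items, gmKey pr.2 = K := by
  induction items using List.reverseRecOn with
  | nil => simp [gmGroups, PySem.Dict.keys_empty]
  | append_singleton l pr ih =>
    have hgg : gmGroups (l ++ [pr])
        = (gmGroups l).insert (gmKey pr.2) (((gmGroups l).getD (gmKey pr.2) []) ++ [pr.1]) := by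
      simp [gmGroups, List.foldl_append, PySem.Dict.modify]
    rw [hgg]
    by_cases hc : (gmGroups l).contains (gmKey pr.2) = true
    · rw [PySem.Dict.keys_insert_of_contains _ _ hc]
      have hmem : gmKey pr.2 ∈ (gmGroups l).keys := (PySem.Dict.contains_iff_mem_keys _ _).mp hc
      constructor
      · intro h
        rcases ih.mp h with ⟨pp, h1, h2⟩
        exact ⟨pp, by simp [h1], h2⟩
      · rintro ⟨pp, hmem2, hkey⟩
        rcases List.mem_append.mp hmem2 with h1 | h1
        · exact ih.mpr ⟨pp, h1, hkey⟩
        · simp at h1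
          subst h1
          rw [← hkey]
          exact hmem
    · have hc2 : (gmGroups l).contains (gmKey pr.2) = false := by
        revert hc
        cases (gmGroups l).contains (gmKey pr.2) <;> simp
      rw [PySem.Dict.keys_insert_of_not_contains _ _ hc2, List.mem_append]
      simp only [List.mem_singleton]
      constructor
      · rintro (h | rfl)
        · rcases ih.mp h with ⟨pp, h1, h2⟩
          exact ⟨pp, by simp [h1], h2⟩
        · exact ⟨pr, by simp, rfl⟩
      · rintro ⟨pp, hmem2, hkey⟩
        rcases List.mem_append.mp hmem2 with h1 | h1
        · exact Or.inl (ih.mpr ⟨pp, h1, hkey⟩)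
        · simp at h1
          subst h1
          exact Or.inr hkey.symm

theorem gm_mem_idxInner (ps : List String) (ix : PySem.Dict String (List (List String)))
    (v : List String) (p : String) (K : List String) :
    K ∈ (ps.foldl (fun ix pep => ix.modify pep [] (fun l => l ++ [v])) ix).getD p []
      ↔ K ∈ ix.getD p [] ∨ (p ∈ ps ∧ K = v) := by
  induction ps generalizing ix with
  | nil => simp
  | cons pep ps ih =>
    simp only [List.foldl_cons]
    rw [ih]
    by_cases hp : p = pep
    · subst hp
      rw [PySem.Dict.getD_modify_self]
      simp only [List.mem_append, List.mem_cons]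
      tauto
    · rw [PySem.Dict.getD_modify_of_ne _ _ _ hp]
      simp only [List.mem_cons]
      tauto

theorem gm_mem_idxFold (keys : List (List String)) (ix : PySem.Dict String (List (List String)))
    (p : String) (K : List String) :
    K ∈ (keys.foldl (fun ix key =>
          key.foldl (fun ix pep => ix.modify pep [] (fun l => l ++ [key])) ix) ix).getD p []
      ↔ K ∈ ix.getD p [] ∨ ∃ k ∈ keys, p ∈ k ∧ K = k := by
  induction keys generalizing ix with
  | nil => simp
  | cons k keys ih =>
    simp only [List.foldl_cons]
    rw [ih, gm_mem_idxInner]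
    simp only [List.mem_cons]
    aesop

theorem gm_mem_gmIndex (keys : List (List String)) (p : String) (K : List String) :
    K ∈ (gmIndex keys).getD p [] ↔ K ∈ keys ∧ p ∈ K := by
  unfold gmIndex
  rw [gm_mem_idxFold]
  simp only [PySem.Dict.getD_empty, List.not_mem_nil, false_or]
  constructor
  · rintro ⟨k, hk, hp, rfl⟩
    exact ⟨hk, hp⟩
  · rintro ⟨hK, hp⟩
    exact ⟨K, hK, hp, rfl⟩

theorem getD_gmDominated (keys : List (List String)) (ix : PySem.Dict String (List (List String)))
    (h : Bool) (K : List String) (hK : K ∈ keys) :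
    (gmDominated keys ix h).getD K true = gmDomVal ix h K := by
  induction keys using List.reverseRecOn with
  | nil => cases hK
  | append_singleton l k ih =>
    have h2 : gmDominated (l ++ [k]) ix h
        = (gmDominated l ix h).insert k (gmDomVal ix h k) := by
      simp [gmDominated, List.foldl_append]
    rw [h2]
    by_cases hKk : K = k
    · subst hKk
      rw [PySem.Dict.getD_insert_self]
    · rw [PySem.Dict.getD_insert_of_ne _ _ _ hKk]
      refine ih ?_
      rcases List.mem_append.mp hK with h1 | h1
      · exact h1
      · simp at h1
        exact absurd h1 hKk

theorem gmDominated_iff (keys : List (List String)) (K : List String) (hK : K ∈ keys) :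
    (gmDominated keys (gmIndex keys) (keys.any (fun k => !k.isEmpty))).getD K true = true
      ↔ ∃ g ∈ keys, g ≠ K ∧ (∀ x ∈ K, x ∈ g) := by
  rw [getD_gmDominated _ _ _ _ hK]
  cases K with
  | nil =>
    simp only [gmDomVal, List.not_mem_nil, false_implies, implies_true]
    rw [List.any_eq_true]
    constructor
    · rintro ⟨k, hk, hne⟩
      refine ⟨k, hk, ?_⟩
      simpa [List.isEmpty_iff] using hne
    · rintro ⟨g, hg, hne⟩
      exact ⟨g, hg, by simpa [List.isEmpty_iff] using hne⟩
  | cons p rest =>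
    simp only [gmDomVal]
    rw [List.any_eq_true]
    constructor
    · rintro ⟨g, hg, hcond⟩
      rw [Bool.and_eq_true] at hcond
      have h1 : g ≠ p :: rest := by simpa using hcond.1
      have h2 : ∀ x ∈ p :: rest, x ∈ g := (PySem.Set.issubset_iff _ _).mp hcond.2
      exact ⟨g, ((gm_mem_gmIndex keys p g).mp hg).1, h1, h2⟩
    · rintro ⟨g, hg, hne, hsub⟩
      refine ⟨g, (gm_mem_gmIndex keys p g).mpr ⟨hg, hsub p (by simp)⟩, ?_⟩
      rw [Bool.and_eq_true]
      exact ⟨by simpa using hne, (PySem.Set.issubset_iff _ _).mpr hsub⟩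

theorem gm_step_eq (items : List (String × List String))
    (hnd : (items.map Prod.fst).Nodup)
    (masters : PySem.Dict String Int) (pr : String × List String) (hpr : pr ∈ items) :
    gmOuterStepA items masters pr
      = gmOuterStepB (gmGroups items)
          (gmDominated (gmGroups items).keys (gmIndex (gmGroups items).keys)
            ((gmGroups items).keys.any (fun k => !k.isEmpty))) masters pr := by
  have fact_eq : ∀ q ∈ items, q.1 = pr.1 → q.2 = pr.2 := by
    intro q hq hfst
    have hq2 : q = pr := List.inj_on_of_nodup_map hnd hq hpr hfst
    rw [hq2]
  have hKkeys : gmKey pr.2 ∈ (gmGroups items).keys :=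
    (mem_keys_gmGroups items (gmKey pr.2)).mpr ⟨pr, hpr, rfl⟩
  -- break condition of A ↔ the "dominated" condition of B
  have hbrk_iff : (items.any (fun q => !(pr.1 == q.1) && gmStrict (PySem.Set.ofList pr.2) q.2)) = true
      ↔ ∃ g ∈ (gmGroups items).keys, g ≠ gmKey pr.2 ∧ (∀ x ∈ gmKey pr.2, x ∈ g) := by
    rw [List.any_eq_true]
    constructor
    · rintro ⟨q, hq, hcond⟩
      rw [Bool.and_eq_true] at hcond
      have hne : q.1 ≠ pr.1 := fun he => by simp [he] at hcond
      rcases (gmStrict_iff pr.2 q.2).mp hcond.2 with ⟨hsub, hnrev⟩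
      refine ⟨gmKey q.2, (mem_keys_gmGroups items _).mpr ⟨q, hq, rfl⟩, ?_, ?_⟩
      · intro hgK
        refine hnrev (fun x hx => ?_)
        have hx2 : x ∈ gmKey q.2 := (mem_gmKey q.2 x).mpr hx
        rw [hgK] at hx2
        exact (mem_gmKey pr.2 x).mp hx2
      · intro x hx
        exact (mem_gmKey q.2 x).mpr (hsub x ((mem_gmKey pr.2 x).mp hx))
    · rintro ⟨g, hg, hne, hsub⟩
      rcases (mem_keys_gmGroups items g).mp hg with ⟨q, hq, rfl⟩
      have hsub2 : ∀ x ∈ pr.2, x ∈ q.2 := by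
        intro x hx
        exact (mem_gmKey q.2 x).mp (hsub x ((mem_gmKey pr.2 x).mpr hx))
      have hnrev : ¬(∀ x ∈ q.2, x ∈ pr.2) := by
        intro hrev
        exact hne (gmKey_eq_of_sameset q.2 pr.2 (fun x => ⟨fun h => hrev x h, fun h => hsub2 x h⟩))
      have hqne : q.1 ≠ pr.1 := by
        intro he
        exact hne (by rw [fact_eq q hq he])
      refine ⟨q, hq, ?_⟩
      rw [Bool.and_eq_true]
      exact ⟨by simpa using (Ne.symm hqne), (gmStrict_iff pr.2 q.2).mpr ⟨hsub2, hnrev⟩⟩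
  -- B's dominated entry equals A's break flag
  have hdom : (gmDominated (gmGroups items).keys (gmIndex (gmGroups items).keys)
        ((gmGroups items).keys.any (fun k => !k.isEmpty))).getD (gmKey pr.2) true
      = items.any (fun q => !(pr.1 == q.1) && gmStrict (PySem.Set.ofList pr.2) q.2) := by
    cases hb : (items.any (fun q => !(pr.1 == q.1) && gmStrict (PySem.Set.ofList pr.2) q.2)) with
    | false =>
      cases hd : ((gmDominated (gmGroups items).keys
          (gmIndex (gmGroups items).keys)
          ((gmGroups items).keys.any (fun k => !k.isEmpty))).getD (gmKey pr.2) true) with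
      | false => rfl
      | true => exact absurd (hbrk_iff.mpr ((gmDominated_iff _ _ hKkeys).mp hd)) (by rw [hb]; simp)
    | true => exact (gmDominated_iff _ _ hKkeys).mpr (hbrk_iff.mp hb)
  simp only [gmOuterStepA, gmOuterStepB, hdom]
  cases hb : (items.any (fun q => !(pr.1 == q.1) && gmStrict (PySem.Set.ofList pr.2) q.2)) with
  | false =>
    -- no strict superset: both sides insert the minimal equal-set protein
    rw [gm_innerA_ok pr.1 (PySem.Set.ofList pr.2) items [] hb]
    simp only [if_neg (Bool.false_ne_true)]
    set mm := items.foldl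
      (fun s q => if !(pr.1 == q.1) && gmEq (PySem.Set.ofList pr.2) q.2
                  then PySem.Set.update s [pr.1, q.1] else s) ([] : PySem.Set String) with hmm
    have hmm_mem : ∀ x, x ∈ mm
        ↔ ∃ q ∈ items, (!(pr.1 == q.1) && gmEq (PySem.Set.ofList pr.2) q.2) = true
            ∧ (x = pr.1 ∨ x = q.1) := by
      intro x
      rw [hmm, gm_mem_mmfold]
      simp
    have hN : (gmGroups items).getD (gmKey pr.2) []
        = (items.filter (fun q => gmKey q.2 == gmKey pr.2)).map Prod.fst :=
      getD_gmGroups items (gmKey pr.2)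
    have hN_mem : ∀ x, x ∈ (gmGroups items).getD (gmKey pr.2) []
        ↔ ∃ q ∈ items, gmKey q.2 = gmKey pr.2 ∧ x = q.1 := by
      intro x
      rw [hN]
      simp only [List.mem_map, List.mem_filter, beq_iff_eq]
      constructor
      · rintro ⟨q, ⟨hq, hk⟩, rfl⟩
        exact ⟨q, hq, hk, rfl⟩
      · rintro ⟨q, hq, hk, rfl⟩
        exact ⟨q, ⟨hq, hk⟩, rfl⟩
    have hany := hb
    rw [List.any_eq_false] at hany
    -- gmKey q.2 = gmKey pr.2 for every q contributing to mm, and conversely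
    have hmm_to_N : ∀ x, x ∈ mm → x ∈ (gmGroups items).getD (gmKey pr.2) [] := by
      intro x hx
      rcases (hmm_mem x).mp hx with ⟨q, hq, hcond, hx12⟩
      rw [Bool.and_eq_true] at hcond
      have hqne : (pr.1 == q.1) = false := by simpa using hcond.1
      have hsub : ∀ y ∈ pr.2, y ∈ q.2 := (gmEq_iff pr.2 q.2).mp hcond.2
      have hnstrict : (!(pr.1 == q.1) && gmStrict (PySem.Set.ofList pr.2) q.2) = false := by
        have hh := hany q hq
        revert hh
        cases (!(pr.1 == q.1) && gmStrict (PySem.Set.ofList pr.2) q.2) <;> simp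
      rw [Bool.and_eq_false_iff] at hnstrict
      have hst : gmStrict (PySem.Set.ofList pr.2) q.2 = false := by
        rcases hnstrict with hh | hh
        · rw [hqne] at hh
          simp at hh
        · exact hh
      have hrev : ∀ y ∈ q.2, y ∈ pr.2 := by
        by_contra hc
        have := (gmStrict_iff pr.2 q.2).mpr ⟨hsub, hc⟩
        rw [this] at hst
        cases hst
      have hkeq : gmKey q.2 = gmKey pr.2 :=
        gmKey_eq_of_sameset q.2 pr.2 (fun y => ⟨fun h => hrev y h, fun h => hsub y h⟩)
      rcases hx12 with rfl | rfl
      · exact (hN_mem pr.1).mpr ⟨pr, hpr, rfl, rfl⟩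
      · exact (hN_mem q.1).mpr ⟨q, hq, hkeq, rfl⟩
    have hN_to_mm : ∀ x, x ∈ (gmGroups items).getD (gmKey pr.2) [] → x = pr.1 ∨ x ∈ mm := by
      intro x hx
      rcases (hN_mem x).mp hx with ⟨q, hq, hkeq, rfl⟩
      by_cases hqe : q.1 = pr.1
      · exact Or.inl hqe
      · refine Or.inr ((hmm_mem q.1).mpr ⟨q, hq, ?_, Or.inr rfl⟩)
        rw [Bool.and_eq_true]
        refine ⟨by simpa using (Ne.symm hqe), (gmEq_iff pr.2 q.2).mpr (fun y hy => ?_)⟩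
        exact (mem_gmKey q.2 y).mp (by rw [hkeq]; exact (mem_gmKey pr.2 y).mpr hy)
    have hprN : pr.1 ∈ (gmGroups items).getD (gmKey pr.2) [] :=
      (hN_mem pr.1).mpr ⟨pr, hpr, rfl, rfl⟩
    rcases hmin : PySem.List.min? ((gmGroups items).getD (gmKey pr.2) []) (fun x => x) with _ | m2
    · rw [PySem.List.min?_eq_none_iff] at hmin
      rw [hmin] at hprN
      cases hprN
    · have hm2N := PySem.List.min?_mem hmin
      have hm2min := PySem.List.min?_isMin hmin
      by_cases hmme : mm.isEmpty = true
      · -- multimaster empty: A inserts pr.1; B's group is exactly [pr.1]-valued members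
        rw [List.isEmpty_iff] at hmme
        have hm2pr : m2 = pr.1 := by
          rcases hN_to_mm m2 hm2N with h | h
          · exact h
          · rw [hmme] at h
            cases h
        simp [hmme, hm2pr]
      · -- multimaster nonempty: A inserts head of sorted, B the min; they coincide
        have hmmne : mm ≠ [] := fun he => hmme (by rw [he]; rfl)
        have hsne : PySem.List.sorted mm (fun x => x) ≠ [] := by
          rw [Ne, PySem.List.sorted_eq_nil_iff]
          exact hmmne
        rcases hsrt : PySem.List.sorted mm (fun x => x) with _ | ⟨m, t⟩
        · exact absurd hsrt hsne
        · have hmne2 : mm.isEmpty ≠ true := hmme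
          have hmmm : m ∈ mm := by
            rw [← PySem.List.mem_sorted mm (fun x => x) false m, hsrt]
            exact List.mem_cons_self ..
          have hmle : ∀ y ∈ mm, m ≤ y := by
            intro y hy
            exact PySem.List.key_head_sorted_le mm (fun x => x) hsrt y hy
          have hmN : m ∈ (gmGroups items).getD (gmKey pr.2) [] := hmm_to_N m hmmm
          have hprmm : pr.1 ∈ mm := by
            rcases List.exists_mem_of_ne_nil mm hmmne with ⟨x0, hx0⟩
            rcases (hmm_mem x0).mp hx0 with ⟨q, hq, hcond, _⟩
            exact (hmm_mem pr.1).mpr ⟨q, hq, hcond, Or.inl rfl⟩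
          have hm2m : m2 ≤ m := hm2min m hmN
          have hmm2 : m ≤ m2 := by
            rcases hN_to_mm m2 hm2N with h | h
            · rw [h]
              exact hmle pr.1 hprmm
            · exact hmle m2 h
          have hmeq : m = m2 := le_antisymm hmm2 hm2m
          simp [hmne2, hmeq]
  | true =>
    -- a strict superset exists: A breaks, B sees dominated = true; both skip
    have hstf := gm_innerA_break pr.1 (PySem.Set.ofList pr.2) items [] hb
    rcases hst : items.foldl (gmInnerStep pr.1 (PySem.Set.ofList pr.2))
        (true, ([] : PySem.Set String), false) with ⟨b1, mm1, b2⟩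
    rw [hst] at hstf
    simp only at hstf
    simp [hstf]

-- ===== VERDICT (by name: the statement is the Claim_ definition above) =====
theorem get_masters_spec : Claim_equal_get_masters := by
  intro ppgraph _
  unfold Spec_get_masters get_masters get_masters_alt
  have hnd : (((PySem.Dict.ofList ppgraph).items).map Prod.fst).Nodup :=
    PySem.Dict.nodup_keys_ofList ppgraph
  exact congrArg PySem.Dict.items
    (PySem.List.foldl_congr_mem _ _ _ _
      (fun masters pr hpr => gm_step_eq _ hnd masters pr hpr))
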